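-- pv_equiv track=rewrite | github.com/JoseIgnacioNN/AraincoRevitTools | scripts/geometria_columnas_eje.py | _union_find_merge
-- ===== SOURCE A (Python) =====
-- def _union_find_merge(indices_pairs, n):
--     parent = list(range(n))
--
--     def find(i):
--         while parent[i] != i:
--             parent[i] = parent[parent[i]]
--             i = parent[i]
--         return i
--
--     def union(i, j):
--         ri, rj = find(i), find(j)
--         if ri != rj:
--             parent[ri] = rj
--
--     for i, j in indices_pairs:
--         union(i, j)
--     groups = {}
--     for i in range(n):
--         r = find(i)
--         groups.setdefault(r, []).append(i)
--     return list(groups.values())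
-- ===== SOURCE B (Python) =====
-- def _union_find_merge(indices_pairs, n):
--     # Alternative algorithm: explicit component labels with full relabelling on
--     # each merge (no parent forest, no find), then one grouping pass.
--     comp = list(range(n))
--     for i, j in indices_pairs:
--         ci, cj = comp[i], comp[j]
--         if ci != cj:
--             comp = [cj if c == ci else c for c in comp]
--     groups = {}
--     for i in range(n):
--         groups.setdefault(comp[i], []).append(i)
--     return list(groups.values())
-- ===== Notes on version B (the rewrite author's own statement) =====
-- stated objective: alternative
-- what changed: Replaces the union-find parent forest (path-halving find, root linking, and a second find pass while grouping) by a flat component-label array that is fully relabelled on each merge, then grouped in one pass.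
import Mathlib
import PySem

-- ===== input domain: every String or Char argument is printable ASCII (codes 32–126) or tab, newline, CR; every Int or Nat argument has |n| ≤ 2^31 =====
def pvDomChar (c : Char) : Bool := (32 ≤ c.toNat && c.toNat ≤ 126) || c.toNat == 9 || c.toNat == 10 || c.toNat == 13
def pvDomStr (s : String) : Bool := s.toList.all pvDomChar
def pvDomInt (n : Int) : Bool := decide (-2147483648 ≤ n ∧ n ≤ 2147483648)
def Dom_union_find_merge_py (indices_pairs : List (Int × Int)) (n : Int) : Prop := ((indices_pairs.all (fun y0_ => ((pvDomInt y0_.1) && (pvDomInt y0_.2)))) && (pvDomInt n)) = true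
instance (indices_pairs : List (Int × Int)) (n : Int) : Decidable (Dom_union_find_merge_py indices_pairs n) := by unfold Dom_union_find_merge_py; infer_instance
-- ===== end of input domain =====

-- B replaces A's union-find parent forest (path-halving find + root linking) by a flat
-- component-label list, fully relabelled at each merge; same return value (alternative algorithm).

-- ===== PORT A =====
-- the while-loop of `find` (fuel recursion; fuel = len(parent)+1 is shown sufficient under Pre_)
def ufFindLoop (parent : List Int) (i : Int) : Nat → List Int × Int
  | 0 => (parent, i)
  | fuel+1 =>
    if PySem.List.pyGetD parent i 0 ≠ i then
      -- parent[i] = parent[parent[i]]; i = parent[i]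
      let g := PySem.List.pyGetD parent (PySem.List.pyGetD parent i 0) 0
      let parent' := PySem.List.pySetD parent i g
      ufFindLoop parent' (PySem.List.pyGetD parent' i 0) fuel
    else (parent, i)

def ufFind (parent : List Int) (i : Int) : List Int × Int :=
  ufFindLoop parent i (parent.length + 1)

def ufUnion (parent : List Int) (i j : Int) : List Int :=
  let r1 := ufFind parent i
  let r2 := ufFind r1.1 j
  if r1.2 ≠ r2.2 then PySem.List.pySetD r2.1 r1.2 r2.2 else r2.1

def union_find_merge_py (indices_pairs : List (Int × Int)) (n : Int) : List (List Int) :=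
  let parent0 := PySem.List.pyRange 0 n 1
  let parentF := indices_pairs.foldl (fun p ij => ufUnion p ij.1 ij.2) parent0
  let st := (PySem.List.pyRange 0 n 1).foldl
      (fun (s : List Int × PySem.Dict Int (List Int)) i =>
        let fr := ufFind s.1 i
        (fr.1, s.2.modify fr.2 [] (· ++ [i])))
      (parentF, PySem.Dict.empty)
  st.2.values

-- ===== PORT B =====
def union_find_merge_py_alt (indices_pairs : List (Int × Int)) (n : Int) : List (List Int) :=
  let comp0 := PySem.List.pyRange 0 n 1
  let comp := indices_pairs.foldl
      (fun comp ij =>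
        let ci := PySem.List.pyGetD comp ij.1 0
        let cj := PySem.List.pyGetD comp ij.2 0
        if ci ≠ cj then comp.map (fun c => if c = ci then cj else c) else comp)
      comp0
  let groups := (PySem.List.pyRange 0 n 1).foldl
      (fun (d : PySem.Dict Int (List Int)) i =>
        d.modify (PySem.List.pyGetD comp i 0) [] (· ++ [i]))
      PySem.Dict.empty
  groups.values

-- ===== PRECONDITION & SPEC =====
-- Pre_ excludes exactly the inputs on which A raises IndexError: a pair with a component
-- outside the valid Python index range [-n, n) of the length-n parent list.
def Pre_union_find_merge_py (indices_pairs : List (Int × Int)) (n : Int) : Prop :=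
  ∀ p ∈ indices_pairs, (-n ≤ p.1 ∧ p.1 < n) ∧ (-n ≤ p.2 ∧ p.2 < n)
instance (indices_pairs : List (Int × Int)) (n : Int) : Decidable (Pre_union_find_merge_py indices_pairs n) := by
  unfold Pre_union_find_merge_py; infer_instance

def pvWitness_union_find_merge_py : (List (Int × Int)) × Int := ([(0, 1), (2, 0)], 4)

def Spec_union_find_merge_py (indices_pairs : List (Int × Int)) (n : Int) (out : List (List Int)) : Prop := out = union_find_merge_py_alt indices_pairs n
instance (indices_pairs : List (Int × Int)) (n : Int) (out : List (List Int)) : Decidable (Spec_union_find_merge_py indices_pairs n out) := by unfold Spec_union_find_merge_py; infer_instance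

-- ===== CLAIM (what is proved, stated in full; the proofs are below) =====
def Claim_equal_union_find_merge_py : Prop := ∀ (indices_pairs : List (Int × Int)) (n : Int), Dom_union_find_merge_py indices_pairs n → Pre_union_find_merge_py indices_pairs n → Spec_union_find_merge_py indices_pairs n (union_find_merge_py indices_pairs n)

-- ===== LEMMAS AND PROOFS =====

-- Abstract model of the parent forest: step / iterate / root machinery (Nat-indexed).
def stN (p : List Int) (k : Nat) : Nat := (p.getD k 0).toNat

def iterP (p : List Int) : Nat → Nat → Nat
  | 0, k => k
  | d+1, k => stN p (iterP p d k)

def RangeOK (p : List Int) (N : Nat) : Prop := ∀ k, k < N → 0 ≤ p.getD k 0 ∧ p.getD k 0 < (N:Int)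
def Acyc (p : List Int) (N : Nat) : Prop := ∀ k d, k < N → 0 < d → iterP p d k = k → stN p k = k
def UFInv (p : List Int) (N : Nat) : Prop := p.length = N ∧ RangeOK p N ∧ Acyc p N
def rootOf (p : List Int) (N k : Nat) : Nat := iterP p N k

-- Python index normalisation for a length-N list.
def nIdx (N : Nat) (i : Int) : Nat := if i < 0 then (i + N).toNat else i.toNat

lemma nIdx_lt {N : Nat} {i : Int} (h1 : -(N:Int) ≤ i) (h2 : i < (N:Int)) : nIdx N i < N := by
  unfold nIdx; split <;> omega

lemma nIdx_ofNat {N : Nat} {i : Int} (h0 : 0 ≤ i) : nIdx N i = i.toNat := by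
  unfold nIdx; split <;> omega

lemma pyGetD_nIdx {xs : List Int} {N : Nat} {i : Int} (hlen : xs.length = N)
    (h1 : -(N:Int) ≤ i) (h2 : i < (N:Int)) (d : Int) :
    PySem.List.pyGetD xs i d = xs.getD (nIdx N i) d := by
  rcases lt_or_ge i 0 with hneg | hpos
  · have hg := PySem.List.pyGetD_neg_natCast xs (-i).toNat d (by omega) (by omega)
    rw [show -((((-i).toNat) : Nat) : Int) = i by omega] at hg
    rw [hg, List.getD_eq_getElem xs d (n := nIdx N i) (by have := nIdx_lt h1 h2; omega)]
    congr 1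
    unfold nIdx; split <;> omega
  · rw [PySem.List.pyGetD_eq_getElem xs d hpos (by omega),
      List.getD_eq_getElem xs d (n := nIdx N i) (by have := nIdx_lt h1 h2; omega)]
    congr 1
    unfold nIdx; split <;> omega

lemma pySetD_nIdx {xs : List Int} {N : Nat} {i : Int} (hlen : xs.length = N)
    (h1 : -(N:Int) ≤ i) (v : Int) :
    PySem.List.pySetD xs i v = xs.set (nIdx N i) v := by
  rcases lt_or_ge i 0 with hneg | hpos
  · simp only [PySem.List.pySetD, PySem.List.pySet?, PySem.List.pyIdx?]
    rw [if_neg (by omega), if_pos (by omega)]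
    simp only [Option.map_some, Option.getD_some]
    congr 1
    unfold nIdx; split <;> omega
  · rw [PySem.List.pySetD_of_nonneg xs v hpos, nIdx_ofNat hpos]

lemma stN_set_ne {p : List Int} {t m : Nat} (v : Int) (h : m ≠ t) :
    stN (p.set t v) m = stN p m := by
  unfold stN
  rcases lt_or_ge m p.length with hm | hm
  · rw [List.getD_eq_getElem _ _ (by simpa using hm), List.getD_eq_getElem _ _ hm,
      List.getElem_set_ne (by omega)]
  · rw [List.getD_eq_default _ _ (by simpa using hm), List.getD_eq_default _ _ hm]

lemma stN_set_self {p : List Int} {t : Nat} (v : Int) (h : t < p.length) :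
    stN (p.set t v) t = v.toNat := by
  unfold stN
  rw [List.getD_eq_getElem _ _ (by simpa using h), List.getElem_set_self]

-- iterP basics
lemma iterP_add (p : List Int) (a b k : Nat) : iterP p (a + b) k = iterP p a (iterP p b k) := by
  induction a with
  | zero => simp [iterP]
  | succ a ih => rw [Nat.succ_add]; simp [iterP, ih]

lemma iterP_root_stable {p : List Int} {r : Nat} (h : stN p r = r) (d : Nat) : iterP p d r = r := by
  induction d with
  | zero => rfl
  | succ d ih => simp [iterP, ih, h]

lemma iterP_stable_of_root {p : List Int} {k d : Nat}
    (h : stN p (iterP p d k) = iterP p d k) {e : Nat} (he : d ≤ e) :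
    iterP p e k = iterP p d k := by
  obtain ⟨c, rfl⟩ := Nat.exists_eq_add_of_le he
  rw [Nat.add_comm, iterP_add, iterP_root_stable h]

lemma iterP_lt {p : List Int} {N : Nat} (hR : RangeOK p N) {k : Nat} (hk : k < N) (d : Nat) :
    iterP p d k < N := by
  induction d with
  | zero => exact hk
  | succ d ih =>
    have := hR _ ih
    simp only [iterP, stN]
    omega

lemma stN_lt {p : List Int} {N : Nat} (hR : RangeOK p N) {k : Nat} (hk : k < N) : stN p k < N := by
  have := hR _ hk; unfold stN; omega

-- pigeonhole: under Inv every node reaches a root in fewer than N steps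
lemma exists_root_lt {p : List Int} {N : Nat} (hI : UFInv p N) {k : Nat} (hk : k < N) :
    ∃ d, d < N ∧ stN p (iterP p d k) = iterP p d k := by
  obtain ⟨hlen, hR, hA⟩ := hI
  have hf : ∀ d : Fin (N + 1), iterP p d.1 k < N := fun d => iterP_lt hR hk d.1
  obtain ⟨a, b, hab, heq⟩ := Fintype.exists_ne_map_eq_of_card_lt
    (fun d : Fin (N + 1) => (⟨iterP p d.1 k, hf d⟩ : Fin N)) (by simp)
  have heq' : iterP p a.1 k = iterP p b.1 k := by
    simpa [Fin.ext_iff] using heq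
  -- wlog a < b
  rcases Nat.lt_or_ge a.1 b.1 with h | h
  · refine ⟨a.1, by omega, ?_⟩
    have hcyc : iterP p (b.1 - a.1) (iterP p a.1 k) = iterP p a.1 k := by
      rw [← iterP_add, Nat.sub_add_cancel (by omega), ← heq']
    have := hA (iterP p a.1 k) (b.1 - a.1) (iterP_lt hR hk a.1) (by omega) hcyc
    exact this
  · have hlt : b.1 < a.1 := by
      rcases Nat.lt_or_ge b.1 a.1 with h' | h'
      · exact h'
      · exact absurd (Fin.ext (by omega)) hab
    refine ⟨b.1, by omega, ?_⟩
    have hcyc : iterP p (a.1 - b.1) (iterP p b.1 k) = iterP p b.1 k := by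
      rw [← iterP_add, Nat.sub_add_cancel (by omega), heq']
    exact hA (iterP p b.1 k) (a.1 - b.1) (iterP_lt hR hk b.1) (by omega) hcyc

lemma rootOf_isRoot {p : List Int} {N : Nat} (hI : UFInv p N) {k : Nat} (hk : k < N) :
    stN p (rootOf p N k) = rootOf p N k := by
  obtain ⟨d, hd, hroot⟩ := exists_root_lt hI hk
  unfold rootOf
  rw [iterP_stable_of_root hroot (by omega)]
  exact hroot

lemma rootOf_eq_of_isRoot {p : List Int} {N k d : Nat} (hd : d ≤ N)
    (h : stN p (iterP p d k) = iterP p d k) : rootOf p N k = iterP p d k :=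
  iterP_stable_of_root h hd

lemma rootOf_lt {p : List Int} {N : Nat} (hR : RangeOK p N) {k : Nat} (hk : k < N) :
    rootOf p N k < N := iterP_lt hR hk N

lemma rootOf_iter {p : List Int} {N : Nat} (hI : UFInv p N) {k : Nat} (hk : k < N) (e : Nat) :
    rootOf p N (iterP p e k) = rootOf p N k := by
  unfold rootOf
  rw [← iterP_add]
  have hroot := rootOf_isRoot hI hk
  exact iterP_stable_of_root hroot (by omega)

lemma rootOf_root {p : List Int} {r : Nat} (h : stN p r = r) (N : Nat) : rootOf p N r = r :=
  iterP_root_stable h N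

-- trajectory agreement with a single pointer overwritten at t
lemma iter_agree_of_avoid {p : List Int} {t : Nat} {v : Int} {k d : Nat}
    (h : ∀ e, e < d → iterP p e k ≠ t) : iterP (p.set t v) d k = iterP p d k := by
  induction d with
  | zero => rfl
  | succ d ih =>
    have ihd : iterP (p.set t v) d k = iterP p d k := ih (fun e he => h e (by omega))
    simp only [iterP, ihd]
    exact stN_set_ne v (h d (by omega))

lemma iter_agree_of_avoid' {p : List Int} {t : Nat} {v : Int} {k d : Nat}
    (h : ∀ e, e < d → iterP (p.set t v) e k ≠ t) : iterP (p.set t v) d k = iterP p d k := by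
  induction d with
  | zero => rfl
  | succ d ih =>
    have ihd : iterP (p.set t v) d k = iterP p d k := ih (fun e he => h e (by omega))
    simp only [iterP, ← ihd]
    exact stN_set_ne v (h d (by omega))

lemma getD_set_ne {p : List Int} {t m : Nat} (v : Int) (h : m ≠ t) :
    (p.set t v).getD m 0 = p.getD m 0 := by
  rcases lt_or_ge m p.length with hm | hm
  · rw [List.getD_eq_getElem _ _ (by simpa using hm), List.getD_eq_getElem _ _ hm,
      List.getElem_set_ne (by omega)]
  · rw [List.getD_eq_default _ _ (by simpa using hm), List.getD_eq_default _ _ hm]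

lemma getD_set_self {p : List Int} {t : Nat} (v : Int) (h : t < p.length) :
    (p.set t v).getD t 0 = v := by
  rw [List.getD_eq_getElem _ _ (by simpa using h), List.getElem_set_self]

-- ── path halving: parent' = parent.set i parent[parent[i]] ──
lemma halve_stN_self {p : List Int} {i : Nat} (hi : i < p.length) :
    stN (p.set i (p.getD (stN p i) 0)) i = stN p (stN p i) := by
  rw [stN_set_self _ hi]; rfl

lemma halve_corr {p : List Int} {i : Nat} (hi : i < p.length) (d k : Nat) :
    ∃ d', d ≤ d' ∧ iterP (p.set i (p.getD (stN p i) 0)) d k = iterP p d' k := by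
  induction d with
  | zero => exact ⟨0, le_refl _, rfl⟩
  | succ d ih =>
    obtain ⟨d', hdd', hagree⟩ := ih
    by_cases hm : iterP (p.set i (p.getD (stN p i) 0)) d k = i
    · refine ⟨d' + 2, by omega, ?_⟩
      simp only [iterP, hm, halve_stN_self hi]
      rw [← hagree, hm]
    · refine ⟨d' + 1, by omega, ?_⟩
      simp only [iterP, hagree] at hm ⊢
      rw [stN_set_ne _ hm]

lemma halve_inv {p : List Int} {N i : Nat} (hI : UFInv p N) (hi : i < N) :
    UFInv (p.set i (p.getD (stN p i) 0)) N := by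
  obtain ⟨hlen, hR, hA⟩ := hI
  have hsi : stN p i < N := stN_lt hR hi
  refine ⟨by simpa using hlen, ?_, ?_⟩
  · intro k hk
    by_cases hki : k = i
    · subst hki
      rw [getD_set_self _ (by omega)]
      exact hR _ hsi
    · rw [getD_set_ne _ hki]; exact hR _ hk
  · intro k d hk hd hcyc
    obtain ⟨d', hdd', hagree⟩ := halve_corr (p := p) (i := i) (by omega) d k
    rw [hagree] at hcyc
    have hroot := hA k d' hk (by omega) hcyc
    by_cases hki : k = i
    · subst hki
      rw [halve_stN_self (by omega), hroot, hroot]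
    · rw [stN_set_ne _ hki]
      exact hroot

lemma halve_root {p : List Int} {N i : Nat} (hI : UFInv p N) (hilen : i < p.length) {k : Nat} (hk : k < N) :
    rootOf (p.set i (p.getD (stN p i) 0)) N k = rootOf p N k := by
  obtain ⟨d', hdd', hagree⟩ := halve_corr (p := p) (i := i) hilen N k
  unfold rootOf
  rw [hagree]
  exact iterP_stable_of_root (rootOf_isRoot hI hk) (by omega)

-- ── union: parent' = parent.set ri rj with ri ≠ rj both roots ──
lemma hit_root {p : List Int} {N : Nat} (hI : UFInv p N) {k r e : Nat} (hk : k < N)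
    (hr : stN p r = r) (hhit : iterP p e k = r) : rootOf p N k = r := by
  have := rootOf_iter hI hk e
  rw [hhit, rootOf_root hr] at this
  exact this.symm

lemma union_stN_self {p : List Int} {N ri rj : Nat} (hlen : p.length = N) (hri : ri < N) :
    stN (p.set ri ((rj : Nat) : Int)) ri = rj := by
  rw [stN_set_self _ (by omega)]; simp

lemma union_root {p : List Int} {N ri rj : Nat} (hI : UFInv p N)
    (hri : ri < N) (hrooti : stN p ri = ri)
    (hrootj : stN p rj = rj) (hne : ri ≠ rj)
    {k : Nat} (hk : k < N) :
    rootOf (p.set ri ((rj : Nat) : Int)) N k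
      = if rootOf p N k = ri then rj else rootOf p N k := by
  have hlen := hI.1
  by_cases hcase : rootOf p N k = ri
  · rw [if_pos hcase]
    have hex : ∃ e, iterP p e k = ri := ⟨N, hcase⟩
    have hd0 : Nat.find hex < N := by
      obtain ⟨d, hd, hroot⟩ := exists_root_lt hI hk
      have h1 : rootOf p N k = iterP p d k := rootOf_eq_of_isRoot (Nat.le_of_lt hd) hroot
      have hdk : iterP p d k = ri := by rw [← h1, hcase]
      calc Nat.find hex ≤ d := Nat.find_le hdk
        _ < N := hd
    have hhit : iterP p (Nat.find hex) k = ri := Nat.find_spec hex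
    have hagree : iterP (p.set ri ((rj : Nat) : Int)) (Nat.find hex) k = iterP p (Nat.find hex) k :=
      iter_agree_of_avoid (fun e he => Nat.find_min hex he)
    have hstep : iterP (p.set ri ((rj : Nat) : Int)) (Nat.find hex + 1) k = rj := by
      simp only [iterP, hagree, hhit]
      exact union_stN_self hlen hri
    have hrootj' : stN (p.set ri ((rj : Nat) : Int)) rj = rj := by
      rw [stN_set_ne _ (Ne.symm hne)]; exact hrootj
    have hstable := iterP_stable_of_root (p := p.set ri ((rj : Nat) : Int)) (k := k)
      (d := Nat.find hex + 1) (by rw [hstep]; exact hrootj') (e := N) (by omega)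
    unfold rootOf
    rw [hstable, hstep]
  · rw [if_neg hcase]
    have havoid : ∀ e, e < N → iterP p e k ≠ ri := by
      intro e _ hhit
      exact hcase (hit_root hI hk hrooti hhit)
    unfold rootOf
    rw [iter_agree_of_avoid havoid]

lemma iterP_mul {p : List Int} {d k : Nat} (h : iterP p d k = k) (c : Nat) :
    iterP p (c * d) k = k := by
  induction c with
  | zero => rw [Nat.zero_mul]; rfl
  | succ c ih =>
    rw [Nat.succ_mul, iterP_add, h, ih]

lemma union_inv {p : List Int} {N ri rj : Nat} (hI : UFInv p N)
    (hri : ri < N) (hrj : rj < N)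
    (hrootj : stN p rj = rj) (hne : ri ≠ rj) :
    UFInv (p.set ri ((rj : Nat) : Int)) N := by
  obtain ⟨hlen, hR, hA⟩ := hI
  refine ⟨by simpa using hlen, ?_, ?_⟩
  · intro k hk
    by_cases hki : k = ri
    · subst hki
      rw [getD_set_self _ (by omega)]
      constructor <;> omega
    · rw [getD_set_ne _ hki]; exact hR _ hk
  · intro k d hk hd hcyc
    by_cases hcase : ∃ e, e < d ∧ iterP (p.set ri ((rj : Nat) : Int)) e k = ri
    · obtain ⟨e, he, hhit⟩ := hcase
      have hstep : iterP (p.set ri ((rj : Nat) : Int)) (e + 1) k = rj := by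
        simp only [iterP, hhit]
        exact union_stN_self hlen hri
      have hrootj' : stN (p.set ri ((rj : Nat) : Int)) rj = rj := by
        rw [stN_set_ne _ (Ne.symm hne)]; exact hrootj
      have hmult : iterP (p.set ri ((rj : Nat) : Int)) ((e + 1) * d) k = k := iterP_mul hcyc _
      have hge : e + 1 ≤ (e + 1) * d := Nat.le_mul_of_pos_right _ hd
      have hstable : iterP (p.set ri ((rj : Nat) : Int)) ((e + 1) * d) k
          = iterP (p.set ri ((rj : Nat) : Int)) (e + 1) k :=
        iterP_stable_of_root (by rw [hstep]; exact hrootj') hge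
      have hkrj : k = rj := by rw [← hmult, hstable, hstep]
      subst hkrj
      exact hrootj'
    · push Not at hcase
      have hagree : iterP (p.set ri ((rj : Nat) : Int)) d k = iterP p d k :=
        iter_agree_of_avoid' (fun e he => hcase e he)
      rw [hagree] at hcyc
      have hroot := hA k d hk hd hcyc
      have hki : k ≠ ri := by
        intro h
        exact hcase 0 hd (by rw [iterP]; exact h)
      rw [stN_set_ne _ hki]
      exact hroot

-- ── the find loop: with enough fuel it returns the root and preserves the forest's roots ──
lemma findLoop_spec {N : Nat} : ∀ (fuel : Nat) (p : List Int) (i : Int) (d : Nat),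
    UFInv p N → -(N:Int) ≤ i → i < (N:Int) →
    stN p (iterP p d (nIdx N i)) = iterP p d (nIdx N i) →
    d + (if i < 0 then 2 else 1) ≤ fuel →
    (ufFindLoop p i fuel).2 = ((rootOf p N (nIdx N i) : Nat) : Int) ∧
    UFInv (ufFindLoop p i fuel).1 N ∧
    (∀ m, m < N → rootOf (ufFindLoop p i fuel).1 N m = rootOf p N m) := by
  intro fuel
  induction fuel with
  | zero => intro p i d hI h1 h2 hwit hfuel; split at hfuel <;> omega
  | succ fuel ih =>
    intro p i d hI h1 h2 hwit hfuel
    have hlen : p.length = N := hI.1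
    set k := nIdx N i with hk_def
    have hk : k < N := nIdx_lt h1 h2
    have hget : PySem.List.pyGetD p i 0 = p.getD k 0 := pyGetD_nIdx hlen h1 h2 0
    have hnn : 0 ≤ p.getD k 0 := (hI.2.1 k hk).1
    have hst : p.getD k 0 = ((stN p k : Nat) : Int) := by
      unfold stN; omega
    by_cases hroot : stN p k = k
    · -- k is already a root
      rcases lt_or_ge i 0 with hneg | hpos
      · -- negative index: the loop still runs one (state-preserving) iteration
        have hcond : PySem.List.pyGetD p i 0 ≠ i := by rw [hget]; omega
        have hgval : PySem.List.pyGetD p (PySem.List.pyGetD p i 0) 0 = p.getD (stN p k) 0 := by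
          rw [hget, hst, PySem.List.pyGetD_natCast, hroot]
        have hset : PySem.List.pySetD p i (PySem.List.pyGetD p (PySem.List.pyGetD p i 0) 0)
            = p.set k (p.getD (stN p k) 0) := by
          rw [hgval, pySetD_nIdx hlen h1]
        have hstep : ufFindLoop p i (fuel + 1)
            = ufFindLoop (p.set k (p.getD (stN p k) 0))
                (PySem.List.pyGetD (p.set k (p.getD (stN p k) 0)) i 0) fuel := by
          rw [ufFindLoop, if_pos hcond]
          show ufFindLoop (PySem.List.pySetD p i (PySem.List.pyGetD p (PySem.List.pyGetD p i 0) 0))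
              (PySem.List.pyGetD (PySem.List.pySetD p i (PySem.List.pyGetD p (PySem.List.pyGetD p i 0) 0)) i 0) fuel = _
          rw [hset]
        have hI' : UFInv (p.set k (p.getD (stN p k) 0)) N := halve_inv hI hk
        have hread : PySem.List.pyGetD (p.set k (p.getD (stN p k) 0)) i 0
            = ((k : Nat) : Int) := by
          rw [pyGetD_nIdx hI'.1 h1 h2, ← hk_def, getD_set_self _ (by omega), hroot, hst, hroot]
        have hres := ih (p.set k (p.getD (stN p k) 0)) ((k : Nat) : Int) 0 hI'
          (by omega) (by omega)
          (by
            rw [nIdx_ofNat (by omega)]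
            simp only [Int.toNat_natCast]
            show stN _ k = k
            rw [hroot, hst, hroot, stN_set_self _ (by omega)]
            simp)
          (by split at hfuel <;> split <;> omega)
        rw [hstep, hread]
        refine ⟨?_, hres.2.1, ?_⟩
        · rw [hres.1, nIdx_ofNat (by omega)]
          simp only [Int.toNat_natCast]
          rw [halve_root hI (by omega) hk]
        · intro m hm
          rw [hres.2.2 m hm, halve_root hI (by omega) hm]
      · -- non-negative index at a root: the loop exits immediately
        have hknat : k = i.toNat := by rw [hk_def, nIdx_ofNat hpos]
        have hkeq : ((k : Nat) : Int) = i := by omega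
        have hcond : ¬ (PySem.List.pyGetD p i 0 ≠ i) := by
          rw [hget, hst, hroot, hkeq]; simp
        rw [ufFindLoop, if_neg hcond]
        refine ⟨?_, hI, fun m hm => rfl⟩
        show i = _
        rw [rootOf_root hroot, hkeq]
    · -- k is not a root: one halving step, then recurse on the grandparent
      have hcond : PySem.List.pyGetD p i 0 ≠ i := by
        rcases lt_or_ge i 0 with hneg | hpos
        · rw [hget]; omega
        · rw [hget, hst]
          intro hcontra
          apply hroot
          have hci : (stN p k : Int) = i := hcontra
          have hknat : k = i.toNat := by rw [hk_def, nIdx_ofNat hpos]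
          omega
      have hd1 : 1 ≤ d := by
        rcases Nat.eq_zero_or_pos d with h0 | h; · subst h0; exact absurd hwit hroot
        · exact h
      have hgval : PySem.List.pyGetD p (PySem.List.pyGetD p i 0) 0 = p.getD (stN p k) 0 := by
        rw [hget, hst, PySem.List.pyGetD_natCast]
      have hset : PySem.List.pySetD p i (PySem.List.pyGetD p (PySem.List.pyGetD p i 0) 0)
          = p.set k (p.getD (stN p k) 0) := by
        rw [hgval, pySetD_nIdx hlen h1]
      have hstep : ufFindLoop p i (fuel + 1)
          = ufFindLoop (p.set k (p.getD (stN p k) 0))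
              (PySem.List.pyGetD (p.set k (p.getD (stN p k) 0)) i 0) fuel := by
        rw [ufFindLoop, if_pos hcond]
        show ufFindLoop (PySem.List.pySetD p i (PySem.List.pyGetD p (PySem.List.pyGetD p i 0) 0))
            (PySem.List.pyGetD (PySem.List.pySetD p i (PySem.List.pyGetD p (PySem.List.pyGetD p i 0) 0)) i 0) fuel = _
        rw [hset]
      have hI' : UFInv (p.set k (p.getD (stN p k) 0)) N := halve_inv hI hk
      have hsk : stN p k < N := stN_lt hI.2.1 hk
      have hnn2 : 0 ≤ p.getD (stN p k) 0 := (hI.2.1 _ hsk).1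
      have hk2 : (p.getD (stN p k) 0).toNat = iterP p 2 k := by
        show _ = stN p (stN p (iterP p 0 k))
        rfl
      have hread : PySem.List.pyGetD (p.set k (p.getD (stN p k) 0)) i 0
          = ((iterP p 2 k : Nat) : Int) := by
        rw [pyGetD_nIdx hI'.1 h1 h2, ← hk_def, getD_set_self _ (by omega), ← hk2]
        omega
      -- root-reachability witness for the grandparent inside the halved forest
      obtain ⟨d'', hge, hagree⟩ := halve_corr (p := p) (i := k) (by omega) (d - 1) (iterP p 2 k)
      have hiter22 : iterP p (d'' + 2) k = iterP p d'' (iterP p 2 k) := by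
        rw [iterP_add]
      have hstab : iterP p (d'' + 2) k = iterP p d k :=
        iterP_stable_of_root hwit (by omega)
      have hrne : iterP p d k ≠ k := by
        intro hcontra
        exact hroot (hcontra ▸ hwit)
      have hwit' : stN (p.set k (p.getD (stN p k) 0)) (iterP (p.set k (p.getD (stN p k) 0)) (d - 1) (iterP p 2 k))
          = iterP (p.set k (p.getD (stN p k) 0)) (d - 1) (iterP p 2 k) := by
        rw [hagree, ← hiter22, hstab, stN_set_ne _ hrne]
        exact hwit
      have hres := ih (p.set k (p.getD (stN p k) 0)) ((iterP p 2 k : Nat) : Int) (d - 1) hI'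
        (by omega) (by exact_mod_cast Int.ofNat_lt.mpr (iterP_lt hI.2.1 hk 2))
        (by rw [nIdx_ofNat (by omega)]; simpa using hwit')
        (by split at hfuel <;> split <;> omega)
      rw [hstep, hread]
      have hnn3 : nIdx N ((iterP p 2 k : Nat) : Int) = iterP p 2 k := by
        rw [nIdx_ofNat (by omega)]; simp
      refine ⟨?_, hres.2.1, ?_⟩
      · rw [hres.1, hnn3, halve_root hI (by omega) (iterP_lt hI.2.1 hk 2),
          rootOf_iter hI hk 2]
      · intro m hm
        rw [hres.2.2 m hm, halve_root hI (by omega) hm]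

lemma ufFind_spec {N : Nat} {p : List Int} {i : Int} (hI : UFInv p N)
    (h1 : -(N:Int) ≤ i) (h2 : i < (N:Int)) :
    (ufFind p i).2 = ((rootOf p N (nIdx N i) : Nat) : Int) ∧
    UFInv (ufFind p i).1 N ∧
    (∀ m, m < N → rootOf (ufFind p i).1 N m = rootOf p N m) := by
  obtain ⟨d, hd, hwit⟩ := exists_root_lt hI (nIdx_lt h1 h2)
  unfold ufFind
  rw [hI.1]
  exact findLoop_spec (N + 1) p i d hI h1 h2 hwit (by split <;> omega)

lemma root_of_rootOf_pres {N : Nat} {q : List Int} (hIq : UFInv q N) {r : Nat} (hr : r < N)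
    (hpres : rootOf q N r = r) : stN q r = r := by
  have := rootOf_isRoot hIq hr
  rw [hpres] at this
  exact this

lemma ufUnion_spec {N : Nat} {p : List Int} {i j : Int} (hI : UFInv p N)
    (hi1 : -(N:Int) ≤ i) (hi2 : i < (N:Int)) (hj1 : -(N:Int) ≤ j) (hj2 : j < (N:Int)) :
    UFInv (ufUnion p i j) N ∧
    (∀ m, m < N → rootOf (ufUnion p i j) N m =
      (if rootOf p N m = rootOf p N (nIdx N i) then rootOf p N (nIdx N j)
       else rootOf p N m)) := by
  obtain ⟨hA1, hA2, hA3⟩ := ufFind_spec hI hi1 hi2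
  obtain ⟨hB1, hB2, hB3⟩ := ufFind_spec hA2 hj1 hj2
  set ri := rootOf p N (nIdx N i) with hri_def
  set rj := rootOf p N (nIdx N j) with hrj_def
  have hiN : nIdx N i < N := nIdx_lt hi1 hi2
  have hjN : nIdx N j < N := nIdx_lt hj1 hj2
  have hriN : ri < N := rootOf_lt hI.2.1 hiN
  have hrjN : rj < N := rootOf_lt hI.2.1 hjN
  have hrj_eq : (ufFind (ufFind p i).1 j).2 = ((rj : Nat) : Int) := by
    rw [hB1, hA3 _ hjN]
  have hroots_pres : ∀ m, m < N → rootOf (ufFind (ufFind p i).1 j).1 N m = rootOf p N m := by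
    intro m hm
    rw [hB3 m hm, hA3 m hm]
  unfold ufUnion
  by_cases hne : ri = rj
  · rw [if_neg (by rw [hA1, hrj_eq, hne]; simp)]
    refine ⟨hB2, fun m hm => ?_⟩
    rw [hroots_pres m hm]
    split <;> simp_all
  · rw [if_pos (by rw [hA1, hrj_eq]; simp; omega)]
    have hset : PySem.List.pySetD (ufFind (ufFind p i).1 j).1 (ufFind p i).2 (ufFind (ufFind p i).1 j).2
        = (ufFind (ufFind p i).1 j).1.set ri ((rj : Nat) : Int) := by
      rw [hA1, hrj_eq, PySem.List.pySetD_natCast]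
    rw [hset]
    have hrooti : stN (ufFind (ufFind p i).1 j).1 ri = ri :=
      root_of_rootOf_pres hB2 hriN (by rw [hroots_pres _ hriN]; exact rootOf_root (rootOf_isRoot hI hiN) N)
    have hrootj : stN (ufFind (ufFind p i).1 j).1 rj = rj :=
      root_of_rootOf_pres hB2 hrjN (by rw [hroots_pres _ hrjN]; exact rootOf_root (rootOf_isRoot hI hjN) N)
    refine ⟨union_inv hB2 hriN hrjN hrootj hne, fun m hm => ?_⟩
    rw [union_root hB2 hriN hrooti hrootj hne hm, hroots_pres m hm]

-- ── coupling invariant between A's parent forest and B's label array ──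
def Couple (p comp : List Int) (N : Nat) : Prop :=
  UFInv p N ∧ comp.length = N ∧
  ∀ k l, k < N → l < N →
    (rootOf p N k = rootOf p N l ↔ comp.getD k 0 = comp.getD l 0)

lemma getD_map_lt {comp : List Int} {f : Int → Int} {k : Nat} (hk : k < comp.length) :
    (comp.map f).getD k 0 = f (comp.getD k 0) := by
  rw [List.getD_eq_getElem _ _ (by simpa using hk), List.getD_eq_getElem _ _ hk, List.getElem_map]

lemma couple_step {N : Nat} {p comp : List Int} {i j : Int} (hC : Couple p comp N)
    (hi1 : -(N:Int) ≤ i) (hi2 : i < (N:Int)) (hj1 : -(N:Int) ≤ j) (hj2 : j < (N:Int)) :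
    Couple (ufUnion p i j)
      (if PySem.List.pyGetD comp i 0 ≠ PySem.List.pyGetD comp j 0
       then comp.map (fun c => if c = PySem.List.pyGetD comp i 0 then PySem.List.pyGetD comp j 0 else c)
       else comp) N := by
  obtain ⟨hI, hlen, hR⟩ := hC
  have hiN : nIdx N i < N := nIdx_lt hi1 hi2
  have hjN : nIdx N j < N := nIdx_lt hj1 hj2
  have hci : PySem.List.pyGetD comp i 0 = comp.getD (nIdx N i) 0 := pyGetD_nIdx hlen hi1 hi2 0
  have hcj : PySem.List.pyGetD comp j 0 = comp.getD (nIdx N j) 0 := pyGetD_nIdx hlen hj1 hj2 0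
  obtain ⟨hU1, hU2⟩ := ufUnion_spec hI hi1 hi2 hj1 hj2
  set ri := rootOf p N (nIdx N i) with hri_def
  set rj := rootOf p N (nIdx N j) with hrj_def
  set ci := comp.getD (nIdx N i) 0 with hci_def
  set cj := comp.getD (nIdx N j) 0 with hcj_def
  -- the updated label array, pointwise
  have hcomp' : ∀ k, k < N →
      (if PySem.List.pyGetD comp i 0 ≠ PySem.List.pyGetD comp j 0
       then comp.map (fun c => if c = PySem.List.pyGetD comp i 0 then PySem.List.pyGetD comp j 0 else c)
       else comp).getD k 0 = (if comp.getD k 0 = ci then cj else comp.getD k 0) := by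
    intro k hk
    rw [hci, hcj]
    by_cases hcc : ci ≠ cj
    · rw [if_pos hcc, getD_map_lt (by omega)]
    · rw [if_neg hcc]
      push Not at hcc
      by_cases h : comp.getD k 0 = ci
      · rw [if_pos h, h, hcc]
      · rw [if_neg h]
  have hlen' : (if PySem.List.pyGetD comp i 0 ≠ PySem.List.pyGetD comp j 0
       then comp.map (fun c => if c = PySem.List.pyGetD comp i 0 then PySem.List.pyGetD comp j 0 else c)
       else comp).length = N := by
    split <;> simp [hlen]
  refine ⟨hU1, hlen', ?_⟩
  intro k l hk hl
  rw [hU2 k hk, hU2 l hl, hcomp' k hk, hcomp' l hl]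
  have hA : ∀ m, m < N → (rootOf p N m = ri ↔ comp.getD m 0 = ci) := fun m hm => hR m _ hm hiN
  have hB : ∀ m, m < N → (rootOf p N m = rj ↔ comp.getD m 0 = cj) := fun m hm => hR m _ hm hjN
  by_cases h1 : rootOf p N k = ri <;> by_cases h2 : rootOf p N l = ri
  · rw [if_pos h1, if_pos h2, if_pos ((hA k hk).mp h1), if_pos ((hA l hl).mp h2)]
    simp
  · rw [if_pos h1, if_neg h2, if_pos ((hA k hk).mp h1),
      if_neg (fun hc => h2 ((hA l hl).mpr hc))]
    rw [eq_comm, hB l hl, eq_comm]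
  · rw [if_neg h1, if_pos h2, if_neg (fun hc => h1 ((hA k hk).mpr hc)),
      if_pos ((hA l hl).mp h2)]
    rw [hB k hk]
  · rw [if_neg h1, if_neg h2, if_neg (fun hc => h1 ((hA k hk).mpr hc)),
      if_neg (fun hc => h2 ((hA l hl).mpr hc))]
    exact hR k l hk hl

lemma pairs_fold {N : Nat} : ∀ (prs : List (Int × Int)) (p comp : List Int),
    Couple p comp N →
    (∀ q ∈ prs, (-(N:Int) ≤ q.1 ∧ q.1 < (N:Int)) ∧ (-(N:Int) ≤ q.2 ∧ q.2 < (N:Int))) →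
    Couple (prs.foldl (fun p ij => ufUnion p ij.1 ij.2) p)
      (prs.foldl (fun comp ij =>
        if PySem.List.pyGetD comp ij.1 0 ≠ PySem.List.pyGetD comp ij.2 0
        then comp.map (fun c => if c = PySem.List.pyGetD comp ij.1 0 then PySem.List.pyGetD comp ij.2 0 else c)
        else comp) comp) N := by
  intro prs
  induction prs with
  | nil => intro p comp hC _; exact hC
  | cons q prs ih =>
    intro p comp hC hbnd
    have hq := hbnd q (by simp)
    exact ih _ _ (couple_step hC hq.1.1 hq.1.2 hq.2.1 hq.2.2)
      (fun q' hq' => hbnd q' (by simp [hq']))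

-- ── A's grouping loop: the interleaved finds key each index by its (stable) root ──
lemma group_fold {N : Nat} : ∀ (L : List Int) (p : List Int) (dAcc : PySem.Dict Int (List Int)),
    UFInv p N → (∀ x ∈ L, 0 ≤ x ∧ x < (N:Int)) →
    (L.foldl (fun (s : List Int × PySem.Dict Int (List Int)) i =>
        let fr := ufFind s.1 i
        (fr.1, s.2.modify fr.2 [] (· ++ [i]))) (p, dAcc)).2
    = L.foldl (fun dd i => dd.modify (((rootOf p N i.toNat : Nat) : Int)) [] (· ++ [i])) dAcc := by
  intro L
  induction L with
  | nil => intro p dAcc _ _; rfl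
  | cons x L ih =>
    intro p dAcc hI hbnd
    have hx := hbnd x (by simp)
    obtain ⟨hF1, hF2, hF3⟩ := ufFind_spec hI (by omega) hx.2
    simp only [List.foldl_cons]
    rw [ih (ufFind p x).1 _ hF2 (fun y hy => hbnd y (by simp [hy]))]
    have hkey : (ufFind p x).2 = ((rootOf p N x.toNat : Nat) : Int) := by
      rw [hF1, nIdx_ofNat hx.1]
    rw [hkey]
    apply PySem.List.foldl_congr_mem
    intro acc y hy
    have hyN : y.toNat < N := by have := hbnd y (by simp [hy]); omega
    rw [hF3 y.toNat hyN]

-- ── grouping dict: closed form of the values list ──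
lemma grouping_closed (L : List Int) (f : Int → Int) :
    (L.foldl (fun d i => d.modify (f i) [] (· ++ [i])) PySem.Dict.empty).values
    = (PySem.Set.ofList (L.map f)).map (fun c => L.filter (fun i => f i == c)) := by
  have hnd : (L.foldl (fun d i => d.modify (f i) [] (· ++ [i])) PySem.Dict.empty).keys.Nodup :=
    PySem.Dict.nodup_keys_foldl_modify_key L f [] (fun _ i => (· ++ [i])) _ PySem.Dict.nodup_keys_empty
  rw [PySem.Dict.values_eq_map_keys _ hnd []]
  have hkeys : (L.foldl (fun d i => d.modify (f i) [] (· ++ [i])) PySem.Dict.empty).keys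
      = PySem.Set.ofList (L.map f) := by
    rw [PySem.Dict.keys_foldl_modify_key L f [] (fun _ i => (· ++ [i])), PySem.Dict.keys_empty,
      PySem.Set.ofList_eq_foldl]
    rfl
  rw [hkeys]
  apply List.map_congr_left
  intro c _
  have h1 : L.foldl (fun d i => d.modify (f i) [] (· ++ [i])) PySem.Dict.empty
      = (L.map (fun i => (f i, i))).foldl (fun d pr => d.modify pr.1 [] (· ++ [pr.2]))
          PySem.Dict.empty := by
    rw [List.foldl_map]
  rw [h1, PySem.Dict.getD_foldl_modify_append, List.filter_map, List.map_map]
  simp [Function.comp_def]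

lemma forall2_snoc {α β : Type} {R : α → β → Prop} {l1 : List α} {l2 : List β} {a : α} {b : β}
    (h : List.Forall₂ R l1 l2) (hab : R a b) : List.Forall₂ R (l1 ++ [a]) (l2 ++ [b]) := by
  induction h with
  | nil => simpa using List.Forall₂.cons hab List.Forall₂.nil
  | cons hx _ ih => exact List.Forall₂.cons hx ih

lemma map_eq_of_forall2 {α β γ : Type} {R : α → β → Prop} {l1 : List α} {l2 : List β}
    {F : α → γ} {G : β → γ} (h : List.Forall₂ R l1 l2) (hFG : ∀ a b, R a b → F a = G b) :
    l1.map F = l2.map G := by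
  induction h with
  | nil => rfl
  | cons hx _ ih => simp [List.map_cons, hFG _ _ hx, ih]

lemma set_add_eq (s : PySem.Set Int) (v : Int) :
    PySem.Set.add s v = if v ∈ s then s else s ++ [v] := by
  by_cases hv : v ∈ s <;>
    simp [PySem.Set.add, hv]

lemma ofList_snoc (A : List Int) (v : Int) :
    PySem.Set.ofList (A ++ [v]) = PySem.Set.add (PySem.Set.ofList A) v := by
  rw [PySem.Set.ofList_eq_foldl, PySem.Set.ofList_eq_foldl, List.foldl_append]
  rfl

lemma ofList_rel : ∀ (M : List Int) (f g : Int → Int),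
    (∀ a ∈ M, ∀ b ∈ M, (f a = f b ↔ g a = g b)) →
    List.Forall₂ (fun a b => ∃ y, y ∈ M ∧ a = f y ∧ b = g y)
      (PySem.Set.ofList (M.map f)) (PySem.Set.ofList (M.map g)) := by
  intro M
  induction M using List.reverseRecOn with
  | nil => intro f g _; exact List.Forall₂.nil
  | append_singleton M x ih =>
    intro f g h
    have hM : ∀ a ∈ M, ∀ b ∈ M, (f a = f b ↔ g a = g b) :=
      fun a ha b hb => h a (by simp [ha]) b (by simp [hb])
    have hrel := ih f g hM
    have hweak : List.Forall₂ (fun a b => ∃ y, y ∈ M ++ [x] ∧ a = f y ∧ b = g y)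
        (PySem.Set.ofList (M.map f)) (PySem.Set.ofList (M.map g)) :=
      List.Forall₂.imp
        (fun a b hab => by obtain ⟨y, hy, e1, e2⟩ := hab; exact ⟨y, by simp [hy], e1, e2⟩) hrel
    simp only [List.map_append, List.map_singleton]
    rw [ofList_snoc, ofList_snoc, set_add_eq, set_add_eq]
    have hmem : f x ∈ PySem.Set.ofList (M.map f) ↔ g x ∈ PySem.Set.ofList (M.map g) := by
      rw [PySem.Set.mem_ofList, PySem.Set.mem_ofList, List.mem_map, List.mem_map]
      constructor
      · rintro ⟨y, hy, he⟩
        exact ⟨y, hy, (h y (by simp [hy]) x (by simp)).mp he⟩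
      · rintro ⟨y, hy, he⟩
        exact ⟨y, hy, (h y (by simp [hy]) x (by simp)).mpr he⟩
    by_cases hin : f x ∈ PySem.Set.ofList (M.map f)
    · rw [if_pos hin, if_pos (hmem.mp hin)]
      exact hweak
    · rw [if_neg hin, if_neg (fun hc => hin (hmem.mpr hc))]
      exact forall2_snoc hweak ⟨x, by simp, rfl, rfl⟩

lemma values_keyfun_congr (L : List Int) (f g : Int → Int)
    (h : ∀ a ∈ L, ∀ b ∈ L, (f a = f b ↔ g a = g b)) :
    (L.foldl (fun d i => d.modify (f i) [] (· ++ [i])) PySem.Dict.empty).values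
    = (L.foldl (fun d i => d.modify (g i) [] (· ++ [i])) PySem.Dict.empty).values := by
  rw [grouping_closed, grouping_closed]
  apply map_eq_of_forall2 (ofList_rel L f g h)
  rintro a b ⟨y, hy, rfl, rfl⟩
  apply List.filter_congr
  intro i hi
  have := h i hi y hy
  by_cases he : f i = f y
  · simp [he, this.mp he]
  · have hg : ¬ g i = g y := fun hc => he (this.mpr hc)
    simp [he, hg]

-- ── the initial state ──
lemma init_getD {n : Int} {k : Nat} (hk : k < n.toNat) :
    (PySem.List.pyRange 0 n 1).getD k 0 = (k : Int) := by
  rw [PySem.List.pyRange_one]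
  rw [List.getD_eq_getElem _ _ (by simpa using hk)]
  simp

lemma init_len {n : Int} : (PySem.List.pyRange 0 n 1).length = n.toNat := by
  rw [PySem.List.pyRange_one]
  simp

lemma init_inv {n : Int} : UFInv (PySem.List.pyRange 0 n 1) n.toNat := by
  refine ⟨init_len, ?_, ?_⟩
  · intro k hk
    rw [init_getD hk]
    constructor <;> omega
  · intro k d hk _ _
    unfold stN
    rw [init_getD hk]
    simp

lemma init_root {n : Int} {k : Nat} (hk : k < n.toNat) :
    rootOf (PySem.List.pyRange 0 n 1) n.toNat k = k := by
  apply iterP_root_stable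
  unfold stN
  rw [init_getD hk]
  simp

lemma init_couple {n : Int} :
    Couple (PySem.List.pyRange 0 n 1) (PySem.List.pyRange 0 n 1) n.toNat := by
  refine ⟨init_inv, init_len, ?_⟩
  intro k l hk hl
  rw [init_root hk, init_root hl, init_getD hk, init_getD hl]
  omega

-- ===== VERDICT (by name: the statement is the Claim_ definition above) =====
theorem union_find_merge_py_spec : Claim_equal_union_find_merge_py := by
  intro prs n _hDom hPre
  unfold Spec_union_find_merge_py
  show (((PySem.List.pyRange 0 n 1).foldl
      (fun (s : List Int × PySem.Dict Int (List Int)) i =>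
        let fr := ufFind s.1 i
        (fr.1, s.2.modify fr.2 [] (· ++ [i])))
      (prs.foldl (fun p ij => ufUnion p ij.1 ij.2) (PySem.List.pyRange 0 n 1),
        PySem.Dict.empty)).2.values)
    = (((PySem.List.pyRange 0 n 1).foldl
        (fun (d : PySem.Dict Int (List Int)) i =>
          d.modify (PySem.List.pyGetD
            (prs.foldl (fun comp ij =>
              if PySem.List.pyGetD comp ij.1 0 ≠ PySem.List.pyGetD comp ij.2 0
              then comp.map (fun c => if c = PySem.List.pyGetD comp ij.1 0 then PySem.List.pyGetD comp ij.2 0 else c)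
              else comp) (PySem.List.pyRange 0 n 1)) i 0) [] (· ++ [i]))
        PySem.Dict.empty).values)
  have hbnd : ∀ q ∈ prs, (-(n.toNat:Int) ≤ q.1 ∧ q.1 < (n.toNat:Int)) ∧
      (-(n.toNat:Int) ≤ q.2 ∧ q.2 < (n.toNat:Int)) := by
    intro q hq
    have := hPre q hq
    omega
  obtain ⟨hIF, hlenF, hRF⟩ := pairs_fold prs _ _ (init_couple (n := n)) hbnd
  have hLb : ∀ x ∈ PySem.List.pyRange 0 n 1, 0 ≤ x ∧ x < ((n.toNat : Nat) : Int) := by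
    intro x hx
    rw [PySem.List.mem_pyRange_one] at hx
    omega
  rw [group_fold (PySem.List.pyRange 0 n 1) _ PySem.Dict.empty hIF hLb]
  apply values_keyfun_congr
  intro a ha b hb
  have hax := hLb a ha
  have hbx := hLb b hb
  have haN : a.toNat < n.toNat := by omega
  have hbN : b.toNat < n.toNat := by omega
  have hga : PySem.List.pyGetD (prs.foldl (fun comp ij =>
        if PySem.List.pyGetD comp ij.1 0 ≠ PySem.List.pyGetD comp ij.2 0
        then comp.map (fun c => if c = PySem.List.pyGetD comp ij.1 0 then PySem.List.pyGetD comp ij.2 0 else c)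
        else comp) (PySem.List.pyRange 0 n 1)) a 0
      = (prs.foldl (fun comp ij =>
        if PySem.List.pyGetD comp ij.1 0 ≠ PySem.List.pyGetD comp ij.2 0
        then comp.map (fun c => if c = PySem.List.pyGetD comp ij.1 0 then PySem.List.pyGetD comp ij.2 0 else c)
        else comp) (PySem.List.pyRange 0 n 1)).getD a.toNat 0 := by
    rw [pyGetD_nIdx hlenF (by omega) (by omega), nIdx_ofNat hax.1]
  have hgb : PySem.List.pyGetD (prs.foldl (fun comp ij =>
        if PySem.List.pyGetD comp ij.1 0 ≠ PySem.List.pyGetD comp ij.2 0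
        then comp.map (fun c => if c = PySem.List.pyGetD comp ij.1 0 then PySem.List.pyGetD comp ij.2 0 else c)
        else comp) (PySem.List.pyRange 0 n 1)) b 0
      = (prs.foldl (fun comp ij =>
        if PySem.List.pyGetD comp ij.1 0 ≠ PySem.List.pyGetD comp ij.2 0
        then comp.map (fun c => if c = PySem.List.pyGetD comp ij.1 0 then PySem.List.pyGetD comp ij.2 0 else c)
        else comp) (PySem.List.pyRange 0 n 1)).getD b.toNat 0 := by
    rw [pyGetD_nIdx hlenF (by omega) (by omega), nIdx_ofNat hbx.1]
  rw [hga, hgb, ← hRF a.toNat b.toNat haN hbN]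
  exact ⟨fun hc => by exact_mod_cast hc, fun hc => by exact_mod_cast hc⟩
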